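-- pv_equiv track=rewrite | github.com/jkershaw2000/aoc | day14/14.py | memoryDecoder
-- ===== SOURCE A (Python) =====
-- def memoryDecoder(value, mask):
--     value = list(value)
--     floating = 0
--     for i, maskVal in enumerate(mask):
--         if maskVal == '1':
--             value[i] = maskVal
--         if maskVal == 'X':
--             value[i] = 'X'
--             floating += 1
--
--     addresses = [value]
--     for i in range(floating):
--         new_addreses = []
--         for addr in addresses:
--             next_X = next(i for i, c in enumerate(addr) if c == 'X')
--             new_addreses.append("".join(addr[:next_X]) + '1' + "".join(addr[next_X+1:]))
--             new_addreses.append("".join(addr[:next_X]) + '0' + "".join(addr[next_X+1:]))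
--         addresses = new_addreses
--     return ["".join(addr) for addr in addresses]
-- ===== SOURCE B (Python) =====
-- def memoryDecoder(value, mask):
--     # Build the masked string in one pass, then expand floating bits depth-first.
--     masked = ''.join(('1' if m == '1' else 'X') if m in '1X' else v
--                      for v, m in zip(value, mask)) + value[len(mask):]
--     k = mask.count('X')
--     out = []
--
--     def expand(s, k):
--         if k == 0:
--             out.append(s)
--             return
--         j = s.index('X')
--         expand(s[:j] + '1' + s[j+1:], k - 1)
--         expand(s[:j] + '0' + s[j+1:], k - 1)
--
--     expand(masked, k)
--     return out
-- ===== Notes on version B (the rewrite author's own statement) =====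
-- stated objective: alternative
-- what changed: Replaces A's in-place enumerate loop over the mask plus breadth-first level-by-level rebuilding of the whole address list (one round per floating bit) by a one-pass zip comprehension that builds the masked string and a recursive depth-first expansion that emits each finished address once.
import Mathlib
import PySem

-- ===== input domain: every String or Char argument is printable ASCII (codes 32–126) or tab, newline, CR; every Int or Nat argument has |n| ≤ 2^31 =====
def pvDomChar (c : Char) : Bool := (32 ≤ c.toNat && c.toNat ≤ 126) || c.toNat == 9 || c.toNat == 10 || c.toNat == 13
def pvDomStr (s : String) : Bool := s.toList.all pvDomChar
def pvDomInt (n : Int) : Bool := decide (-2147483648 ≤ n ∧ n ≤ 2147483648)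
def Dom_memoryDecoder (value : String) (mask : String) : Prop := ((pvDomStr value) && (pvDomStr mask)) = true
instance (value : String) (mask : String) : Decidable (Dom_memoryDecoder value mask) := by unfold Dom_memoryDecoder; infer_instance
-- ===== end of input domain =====

-- B replaces A's in-place mask loop + breadth-first rounds of address lists by a one-pass
-- zip masking and a depth-first recursive expansion of the floating bits (objective: alternative).

-- ===== PORT A =====
-- the body of A's enumerate(mask) loop: value[i] = '1' / 'X', floating += 1
def maskStepA (s : List Char × Nat) (p : Char × Nat) : List Char × Nat :=
  let v := if p.1 = '1' then s.1.set p.2 '1' else s.1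
  if p.1 = 'X' then (v.set p.2 'X', s.2 + 1) else (v, s.2)

-- A's inner loop over `addresses`: replace the first 'X' (next(...) over enumerate = findIdx)
-- by '1' and by '0', appending both
def expandRoundA (addrs : List (List Char)) : List (List Char) :=
  addrs.foldl (fun acc addr =>
    let nx := addr.findIdx (· = 'X')
    acc ++ [addr.take nx ++ '1' :: addr.drop (nx + 1),
            addr.take nx ++ '0' :: addr.drop (nx + 1)]) []

def memoryDecoder (value : String) (mask : String) : List String :=
  let st := mask.toList.zipIdx.foldl maskStepA (value.toList, 0)
  let addresses := (List.range st.2).foldl (fun addrs _ => expandRoundA addrs) [st.1]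
  addresses.map (fun a => String.ofList a)

-- ===== PORT B =====
-- B's one-pass masking comprehension over zip(value, mask) plus the unmasked tail
def altMask (value mask : List Char) : List Char :=
  (value.zip mask).map
      (fun p => if p.2 = '1' ∨ p.2 = 'X' then (if p.2 = '1' then '1' else 'X') else p.1)
    ++ value.drop mask.length

-- B's recursive depth-first expansion: s.index('X') = findIdx, '1' branch first
def altExpand : Nat → List Char → List (List Char)
  | 0, s => [s]
  | k + 1, s =>
    let j := s.findIdx (· = 'X')
    altExpand k (s.take j ++ '1' :: s.drop (j + 1)) ++
      altExpand k (s.take j ++ '0' :: s.drop (j + 1))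

def memoryDecoder_alt (value : String) (mask : String) : List String :=
  (altExpand (mask.toList.count 'X') (altMask value.toList mask.toList)).map
    (fun a => String.ofList a)

-- ===== PRECONDITION & SPEC =====
-- Pre_ excludes exactly the inputs where A raises IndexError: a '1' or 'X' in the mask at a
-- position beyond the end of value (the assignment value[i] = … fails there).
def Pre_memoryDecoder (value : String) (mask : String) : Prop :=
  (mask.toList.drop value.toList.length).all (fun c => !(c == '1' || c == 'X')) = true
instance (value : String) (mask : String) : Decidable (Pre_memoryDecoder value mask) := by
  unfold Pre_memoryDecoder; infer_instance

def pvWitness_memoryDecoder : String × String := ("00", "1X")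

def Spec_memoryDecoder (value : String) (mask : String) (out : List String) : Prop :=
  out = memoryDecoder_alt value mask
instance (value : String) (mask : String) (out : List String) :
    Decidable (Spec_memoryDecoder value mask out) := by
  unfold Spec_memoryDecoder; infer_instance

-- ===== CLAIM (what is proved, stated in full; the proofs are below) =====
def Claim_equal_memoryDecoder : Prop :=
  ∀ (value : String) (mask : String), Dom_memoryDecoder value mask →
    Pre_memoryDecoder value mask →
      Spec_memoryDecoder value mask (memoryDecoder value mask)

-- ===== LEMMAS AND PROOFS =====

theorem set_append_len (l₁ l₂ : List Char) (v c : Char) :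
    (l₁ ++ v :: l₂).set l₁.length c = l₁ ++ c :: l₂ := by
  induction l₁ with
  | nil => simp
  | cons a t ih => simp [ih]

theorem set_oob (l : List Char) (n : Nat) (c : Char) (h : l.length ≤ n) :
    l.set n c = l := by
  exact List.set_eq_of_length_le h

-- A's mask loop is a no-op on the list once the index has passed the end of value
theorem foldA_oob (ms : List Char) (n : Nat) (w : List Char) (fl : Nat)
    (h : w.length ≤ n) :
    (ms.zipIdx n).foldl maskStepA (w, fl) = (w, fl + ms.count 'X') := by
  induction ms generalizing n fl with
  | nil => simp
  | cons m mt ih =>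
    have hs : maskStepA (w, fl) (m, n) = (w, fl + if m = 'X' then 1 else 0) := by
      simp [maskStepA, set_oob w n _ h]
      split_ifs <;> rfl
    simp only [List.zipIdx_cons, List.foldl_cons, hs]
    rw [ih (n + 1) _ (Nat.le_succ_of_le h)]
    by_cases hm : m = 'X' <;> simp [hm] <;> omega

-- A's mask loop computes B's one-pass masking and counts the mask's 'X' characters
theorem foldA_main (ms pre suf : List Char) (fl : Nat) :
    (ms.zipIdx pre.length).foldl maskStepA (pre ++ suf, fl) =
      (pre ++ altMask suf ms, fl + ms.count 'X') := by
  induction ms generalizing pre suf fl with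
  | nil => simp [altMask]
  | cons m mt ih =>
    cases suf with
    | nil =>
      have := foldA_oob (m :: mt) pre.length pre fl (Nat.le_refl _)
      simpa [altMask] using this
    | cons v vt =>
      have hset : ∀ c : Char, (pre ++ v :: vt).set pre.length c = pre ++ c :: vt :=
        fun c => set_append_len pre vt v c
      have hs : maskStepA (pre ++ v :: vt, fl) (m, pre.length) =
          (pre ++ (if m = '1' then '1' else if m = 'X' then 'X' else v) :: vt,
            fl + if m = 'X' then 1 else 0) := by
        by_cases h1 : m = '1'
        · simp [maskStepA, h1, hset]
        · by_cases hx : m = 'X' <;> simp [maskStepA, h1, hx, hset]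
      simp only [List.zipIdx_cons, List.foldl_cons, hs]
      have hlen : pre.length + 1 = (pre ++ [if m = '1' then '1' else if m = 'X' then 'X' else v]).length := by
        simp
      rw [show pre ++ (if m = '1' then '1' else if m = 'X' then 'X' else v) :: vt =
            (pre ++ [if m = '1' then '1' else if m = 'X' then 'X' else v]) ++ vt by simp,
          hlen, ih]
      have hmask : altMask (v :: vt) (m :: mt) =
          (if m = '1' then '1' else if m = 'X' then 'X' else v) :: altMask vt mt := by
        by_cases h1 : m = '1'
        · simp [altMask, h1]
        · by_cases hx : m = 'X' <;> simp [altMask, h1, hx]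
      rw [hmask]
      by_cases hx : m = 'X' <;> simp [hx] <;> omega

-- the two replacement branches of one address
def brA (a : List Char) : List (List Char) :=
  let nx := a.findIdx (· = 'X')
  [a.take nx ++ '1' :: a.drop (nx + 1), a.take nx ++ '0' :: a.drop (nx + 1)]

theorem expandRoundA_flat (addrs : List (List Char)) :
    expandRoundA addrs = addrs.flatMap brA := by
  simpa [expandRoundA, brA] using
    PySem.List.foldl_append_eq_flatMap (l := addrs) (g := brA) (acc := [])

theorem expandRoundA_append (xs ys : List (List Char)) :
    expandRoundA (xs ++ ys) = expandRoundA xs ++ expandRoundA ys := by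
  simp [expandRoundA_flat]

def iterA (k : Nat) (as : List (List Char)) : List (List Char) :=
  (List.range k).foldl (fun addrs _ => expandRoundA addrs) as

theorem iterA_succ (k : Nat) (as : List (List Char)) :
    iterA (k + 1) as = expandRoundA (iterA k as) := by
  simp [iterA, List.range_succ]

theorem iterA_comm (k : Nat) (as : List (List Char)) :
    iterA k (expandRoundA as) = expandRoundA (iterA k as) := by
  induction k generalizing as with
  | zero => rfl
  | succ k ih => rw [iterA_succ, iterA_succ, ih]

theorem iterA_succ' (k : Nat) (as : List (List Char)) :
    iterA (k + 1) as = iterA k (expandRoundA as) := by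
  rw [iterA_succ, iterA_comm]

theorem iterA_append (k : Nat) (xs ys : List (List Char)) :
    iterA k (xs ++ ys) = iterA k xs ++ iterA k ys := by
  induction k generalizing xs ys with
  | zero => rfl
  | succ k ih => rw [iterA_succ', expandRoundA_append, ih, iterA_succ', iterA_succ']

-- A's breadth-first rounds starting from one address equal B's depth-first expansion
theorem iterA_singleton (k : Nat) (a : List Char) :
    iterA k [a] = altExpand k a := by
  induction k generalizing a with
  | zero => rfl
  | succ k ih =>
    have h1 : expandRoundA [a] = brA a := by simp [expandRoundA_flat]
    rw [iterA_succ', h1]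
    show iterA k ([a.take (a.findIdx (· = 'X')) ++ '1' :: a.drop (a.findIdx (· = 'X') + 1)] ++
        [a.take (a.findIdx (· = 'X')) ++ '0' :: a.drop (a.findIdx (· = 'X') + 1)]) = _
    rw [iterA_append, ih, ih]
    rfl

-- ===== VERDICT (by name: the statement is the Claim_ definition above) =====
theorem memoryDecoder_spec : Claim_equal_memoryDecoder := by
  intro value mask _ _
  unfold Spec_memoryDecoder memoryDecoder memoryDecoder_alt
  have hfold := foldA_main mask.toList [] value.toList 0
  simp only [List.nil_append, List.length_nil, Nat.zero_add] at hfold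
  rw [show mask.toList.zipIdx = mask.toList.zipIdx 0 from rfl, hfold]
  show List.map (fun a => String.ofList a)
      (iterA (List.count 'X' mask.toList) [altMask value.toList mask.toList]) = _
  rw [iterA_singleton]
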